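-- pv_equiv track=rewrite | github.com/LazyEntity/leetcode | Task Completion.py | getMaximumRewardPoints
-- ===== SOURCE A (Python) =====
-- def getMaximumRewardPoints(n, k, arr1, arr2):
--     sorted_indexes = sorted([i for i in range(0, n)], key=lambda i: arr1[i] - arr2[i], reverse=True)
--     result = 0
--     for i in range(0, k):
--         result += arr1[sorted_indexes[i]]
--     for i in range(k, n):
--         result += arr2[sorted_indexes[i]]
--     return result
-- ===== SOURCE B (Python) =====
-- def _top_sum(vals, k):
--     # sum of the k largest values of vals, by deterministic quickselect partitioning
--     if k <= 0:
--         return 0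
--     if k >= len(vals):
--         return sum(vals)
--     p = vals[len(vals) // 2]
--     hi = [x for x in vals if x > p]
--     if k <= len(hi):
--         return _top_sum(hi, k)
--     eq = [x for x in vals if x == p]
--     if k <= len(hi) + len(eq):
--         return sum(hi) + p * (k - len(hi))
--     lo = [x for x in vals if x < p]
--     return sum(hi) + sum(eq) + _top_sum(lo, k - len(hi) - len(eq))
--
--
-- def getMaximumRewardPoints(n, k, arr1, arr2):
--     total = 0
--     for i in range(0, n):
--         total += arr2[i]
--     return total + _top_sum([arr1[i] - arr2[i] for i in range(0, n)], k)
-- ===== Notes on version B (the rewrite author's own statement) =====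
-- stated objective: alternative
-- what changed: A stably sorts index positions by arr1[i]-arr2[i] and sums arr1/arr2 through that permutation; B never sorts: it sums the first n entries of arr2 and adds the sum of the k largest differences found by a recursive three-way quickselect partition (pivot = middle element), so no ordering or index permutation is ever built.
-- intended difference: On inputs with k < 0 and 0 <= n, A's loop range(k, n) re-reads the last -k sorted positions through Python negative-index wraparound and adds those arr2 entries a second time on top of the full arr2 sum (e.g. 11 on (2, -1, [5, 1], [3, 4])); B returns plain sum(arr2[:n]) (7 there), the intended value when no task is chosen (k <= 0). — e.g. on getMaximumRewardPoints(2, -1, [5, 1], [3, 4]): A returns 11, B returns 7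
import Mathlib
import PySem

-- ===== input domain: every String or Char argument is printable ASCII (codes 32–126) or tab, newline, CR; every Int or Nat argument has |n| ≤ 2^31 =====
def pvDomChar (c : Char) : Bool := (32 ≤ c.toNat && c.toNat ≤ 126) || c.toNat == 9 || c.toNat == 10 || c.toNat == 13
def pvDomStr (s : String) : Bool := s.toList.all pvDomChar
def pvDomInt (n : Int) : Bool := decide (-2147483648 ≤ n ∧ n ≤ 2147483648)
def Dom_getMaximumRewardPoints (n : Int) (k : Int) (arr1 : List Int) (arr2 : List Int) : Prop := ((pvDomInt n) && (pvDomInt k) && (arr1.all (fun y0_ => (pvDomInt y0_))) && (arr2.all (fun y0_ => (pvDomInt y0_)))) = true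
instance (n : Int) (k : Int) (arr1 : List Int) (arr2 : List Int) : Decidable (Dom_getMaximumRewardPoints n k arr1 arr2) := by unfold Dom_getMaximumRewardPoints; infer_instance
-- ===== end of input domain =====

-- B replaces A's stable index sort + permutation re-indexing by "sum of arr2's first n entries + sum of the k
-- largest differences via a recursive three-way quickselect partition" (alternative algorithm: no sort is performed).


-- ===== PORT A =====
def getMaximumRewardPoints (n : Int) (k : Int) (arr1 : List Int) (arr2 : List Int) : Int :=
  let sorted_indexes := PySem.List.sorted (PySem.List.pyRange 0 n 1)
      (fun i => PySem.List.pyGetD arr1 i 0 - PySem.List.pyGetD arr2 i 0) true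
  let result := (PySem.List.pyRange 0 k 1).foldl
      (fun r i => r + PySem.List.pyGetD arr1 (PySem.List.pyGetD sorted_indexes i 0) 0) 0
  (PySem.List.pyRange k n 1).foldl
      (fun r i => r + PySem.List.pyGetD arr2 (PySem.List.pyGetD sorted_indexes i 0) 0) result

-- ===== PORT B =====

-- sum of the k largest entries of vals, by deterministic three-way quickselect partitioning (port of _top_sum).
-- The fuel argument is a pure totality guard: every recursive call is on a strictly shorter list, so
-- fuel = vals.length (as passed by pvTopSum below) always suffices and the branch computation is Source B's.
def pvTopSumFuel : Nat → List Int → Int → Int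
  | 0, _, _ => 0
  | fuel + 1, vals, k =>
    if k ≤ 0 then 0
    else if (vals.length : Int) ≤ k then vals.sum
    else
      -- vals[len(vals) // 2]: both operands are nonnegative, so Lean's Int '/' equals Python's '//' here
      let p := PySem.List.pyGetD vals ((vals.length : Int) / 2) 0
      let hi := vals.filter (fun x => decide (p < x))
      if k ≤ (hi.length : Int) then pvTopSumFuel fuel hi k
      else
        let eq := vals.filter (fun x => x == p)
        if k ≤ (hi.length : Int) + (eq.length : Int) then
          hi.sum + p * (k - (hi.length : Int))
        else
          let lo := vals.filter (fun x => decide (x < p))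
          hi.sum + eq.sum + pvTopSumFuel fuel lo (k - (hi.length : Int) - (eq.length : Int))

def pvTopSum (vals : List Int) (k : Int) : Int := pvTopSumFuel vals.length vals k
def getMaximumRewardPoints_alt (n : Int) (k : Int) (arr1 : List Int) (arr2 : List Int) : Int :=
  let total := (PySem.List.pyRange 0 n 1).foldl (fun t i => t + PySem.List.pyGetD arr2 i 0) 0
  total + pvTopSum ((PySem.List.pyRange 0 n 1).map
      (fun i => PySem.List.pyGetD arr1 i 0 - PySem.List.pyGetD arr2 i 0)) k

-- ===== PRECONDITION & SPEC =====
-- Pre_ is exactly the set of inputs on which Python A returns normally: the natural domain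
-- (pick 0 ≤ k ≤ n tasks, n entries present in both arrays), the degenerate region n ≤ k ≤ 0
-- where every loop is empty, and the region -n ≤ k < 0 where A's loops still index in range
-- (via Python negative-index wraparound); everywhere else A raises an IndexError.
def Pre_getMaximumRewardPoints (n : Int) (k : Int) (arr1 : List Int) (arr2 : List Int) : Prop :=
  (0 ≤ k ∧ k ≤ n ∧ n ≤ (arr1.length : Int) ∧ n ≤ (arr2.length : Int)) ∨
  (n ≤ 0 ∧ n ≤ k ∧ k ≤ 0) ∨
  (0 < n ∧ -n ≤ k ∧ k < 0 ∧ n ≤ (arr1.length : Int) ∧ n ≤ (arr2.length : Int))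
instance (n : Int) (k : Int) (arr1 : List Int) (arr2 : List Int) : Decidable (Pre_getMaximumRewardPoints n k arr1 arr2) := by unfold Pre_getMaximumRewardPoints; infer_instance
def pvWitness_getMaximumRewardPoints : Int × Int × List Int × List Int := (3, 2, [4, 1, 7], [2, 5, 3])

-- On inputs with k < 0 and 0 ≤ n, A's loop range(k, n) re-reads the last -k sorted positions through
-- Python negative-index wraparound and adds those arr2 entries a second time on top of the full arr2 sum;
-- B returns plain sum(arr2[:n]) (no task chosen when k ≤ 0), the intended value for a non-positive k.
def D_getMaximumRewardPoints (n : Int) (k : Int) (arr1 : List Int) (arr2 : List Int) : Prop :=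
  k < 0 ∧ 0 ≤ n
instance (n : Int) (k : Int) (arr1 : List Int) (arr2 : List Int) : Decidable (D_getMaximumRewardPoints n k arr1 arr2) := by unfold D_getMaximumRewardPoints; infer_instance

def Spec_getMaximumRewardPoints (n : Int) (k : Int) (arr1 : List Int) (arr2 : List Int) (out : Int) : Prop := ¬ D_getMaximumRewardPoints n k arr1 arr2 → out = getMaximumRewardPoints_alt n k arr1 arr2
instance (n : Int) (k : Int) (arr1 : List Int) (arr2 : List Int) (out : Int) : Decidable (Spec_getMaximumRewardPoints n k arr1 arr2 out) := by unfold Spec_getMaximumRewardPoints; infer_instance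

def pvDiffWitness_getMaximumRewardPoints : Int × Int × List Int × List Int := (2, -1, [5, 1], [3, 4])
def pvDiffWitnessOut_getMaximumRewardPoints : Int × Int := (11, 7)

-- ===== CLAIM (what is proved, stated in full; the proofs are below) =====
def Claim_unchanged_getMaximumRewardPoints : Prop := ∀ (n : Int) (k : Int) (arr1 : List Int) (arr2 : List Int), Dom_getMaximumRewardPoints n k arr1 arr2 → Pre_getMaximumRewardPoints n k arr1 arr2 → Spec_getMaximumRewardPoints n k arr1 arr2 (getMaximumRewardPoints n k arr1 arr2)
def Claim_changed_getMaximumRewardPoints : Prop := Dom_getMaximumRewardPoints (pvDiffWitness_getMaximumRewardPoints.1) (pvDiffWitness_getMaximumRewardPoints.2.1) (pvDiffWitness_getMaximumRewardPoints.2.2.1) (pvDiffWitness_getMaximumRewardPoints.2.2.2) ∧ Pre_getMaximumRewardPoints (pvDiffWitness_getMaximumRewardPoints.1) (pvDiffWitness_getMaximumRewardPoints.2.1) (pvDiffWitness_getMaximumRewardPoints.2.2.1) (pvDiffWitness_getMaximumRewardPoints.2.2.2) ∧ D_getMaximumRewardPoints (pvDiffWitness_getMaximumRewardPoints.1) (pvDiffWitness_getMaximumRewardPoints.2.1)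 (pvDiffWitness_getMaximumRewardPoints.2.2.1) (pvDiffWitness_getMaximumRewardPoints.2.2.2) ∧ getMaximumRewardPoints (pvDiffWitness_getMaximumRewardPoints.1) (pvDiffWitness_getMaximumRewardPoints.2.1) (pvDiffWitness_getMaximumRewardPoints.2.2.1) (pvDiffWitness_getMaximumRewardPoints.2.2.2) = pvDiffWitnessOut_getMaximumRewardPoints.1 ∧ getMaximumRewardPoints_alt (pvDiffWitness_getMaximumRewardPoints.1) (pvDiffWitness_getMaximumRewardPoints.2.1) (pvDiffWitness_getMaximumRewardPoints.2.2.1) (pvDiffWitness_getMaximumRewardPoints.2.2.2) = pvDiffWitnessOut_getMaximumRewardPoints.2 ∧ pvDiffWitnessOut_getMaximumRewardPoints.1 ≠ pvDiffWitnessOut_getMaximumRewardPoints.2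

-- ===== LEMMAS AND PROOFS =====

-- removing a witnessed element makes a filter strictly shorter
theorem pv_filter_length_lt {f : Int → Bool} {l : List Int} {x : Int}
    (hx : x ∈ l) (hfx : f x = false) : (l.filter f).length < l.length := by
  induction l with
  | nil => cases hx
  | cons a t ih =>
    rcases List.mem_cons.mp hx with rfl | hx'
    · rw [List.filter_cons, hfx]
      exact Nat.lt_succ_of_le (List.length_filter_le _ _)
    · by_cases hfa : f a
      · rw [List.filter_cons, if_pos hfa]
        exact Nat.succ_lt_succ (ih hx')
      · rw [List.filter_cons, if_neg hfa]
        exact Nat.lt_succ_of_lt (ih hx')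

-- the pivot vals[len(vals)//2] is a member of vals (for nonempty vals)
theorem pv_pivot_mem (l : List Int) (h : 0 < l.length) :
    PySem.List.pyGetD l ((l.length : Int) / 2) 0 ∈ l := by
  have hcast : ((l.length : Int) / 2) = ((l.length / 2 : Nat) : Int) := by
    omega
  rw [hcast, PySem.List.pyGetD_natCast]
  have hlt : l.length / 2 < l.length := Nat.div_lt_self h (by norm_num)
  rw [List.getD_eq_getElem?_getD, List.getElem?_eq_getElem hlt]
  exact List.getElem_mem _


-- folding "+ f x" is the initial value plus the sum of the mapped list
theorem pv_foldl_add {α : Type} (f : α → Int) (l : List α) (c : Int) :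
    l.foldl (fun r x => r + f x) c = c + (l.map f).sum := by
  induction l generalizing c with
  | nil => simp
  | cons x t ih => simp [List.foldl_cons, ih, add_assoc]

-- [xs[i] for i in range(j)] = xs.take j  (j ≤ len xs)
theorem pv_map_pyGetD_range_take (xs : List Int) (j : Nat) (hj : j ≤ xs.length) :
    (PySem.List.pyRange 0 (j : Int) 1).map (fun i => PySem.List.pyGetD xs i 0) = xs.take j := by
  induction j with
  | zero => simp [PySem.List.pyRange_one_eq_nil]
  | succ m ih =>
    rw [show ((m + 1 : Nat) : Int) = (m : Int) + 1 by push_cast; ring,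
        PySem.List.pyRange_one_succ_right (a := 0) (b := (m : Int)) (by positivity)]
    have hm : m < xs.length := hj
    rw [List.map_append, ih (Nat.le_of_lt hm), List.take_add_one]
    simp [PySem.List.pyGetD_natCast, List.getD_eq_getElem?_getD, List.getElem?_eq_getElem hm]

theorem pv_sum_map_split (g d : Int → Int) (l : List Int) :
    (l.map (fun j => g j + d j)).sum = (l.map g).sum + (l.map d).sum := by
  induction l with
  | nil => simp
  | cons x t ih => simp [ih]; ring

-- descending sort, shorthand
def pvSortD (l : List Int) : List Int := PySem.List.sorted l (fun x => x) true

theorem pv_sortD_perm (l : List Int) : (pvSortD l).Perm l := PySem.List.sorted_perm _ _ _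

theorem pv_topSum_nil (k : Int) : pvTopSum [] k = 0 := rfl

theorem pv_sortD_pairwise (l : List Int) : (pvSortD l).Pairwise (fun a b => b ≤ a) := by
  simpa using PySem.List.sorted_pairwise_rev l (fun x => x)

theorem pv_pairwise_of_all_eq (p : Int) (l : List Int) (h : ∀ x ∈ l, x = p) :
    l.Pairwise (fun a b : Int => b ≤ a) := by
  induction l with
  | nil => exact List.Pairwise.nil
  | cons a t ih =>
    refine List.Pairwise.cons (fun b hb => ?_) (ih (fun x hx => h x (List.mem_cons_of_mem _ hx)))
    rw [h a List.mem_cons_self, h b (List.mem_cons_of_mem _ hb)]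

theorem pv_sum_all_eq (p : Int) (l : List Int) (h : ∀ x ∈ l, x = p) :
    l.sum = p * l.length := by
  induction l with
  | nil => simp
  | cons a t ih =>
    rw [List.sum_cons, ih (fun x hx => h x (List.mem_cons_of_mem _ hx)),
        h a List.mem_cons_self, List.length_cons]
    push_cast; ring

-- the three-way partition of the descending sort around any pivot p
theorem pv_sortD_partition (l : List Int) (p : Int) :
    pvSortD l = pvSortD (l.filter (fun x => decide (p < x)))
      ++ (l.filter (fun x => x == p) ++ pvSortD (l.filter (fun x => decide (x < p)))) := by
  have hhi : ∀ x ∈ l.filter (fun x => decide (p < x)), p < x := by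
    intro x hx; simpa using (List.mem_filter.mp hx).2
  have heq : ∀ x ∈ l.filter (fun x : Int => x == p), x = p := by
    intro x hx; simpa using (List.mem_filter.mp hx).2
  have hlo : ∀ x ∈ l.filter (fun x => decide (x < p)), x < p := by
    intro x hx; simpa using (List.mem_filter.mp hx).2
  -- both sides are descending-pairwise permutations of l, hence equal
  have hperm : (pvSortD (l.filter (fun x => decide (p < x)))
      ++ (l.filter (fun x => x == p) ++ pvSortD (l.filter (fun x => decide (x < p))))).Perm l := by
    have h1 : (l.filter (fun x => decide (p < x))
        ++ l.filter (fun x => !decide (p < x))).Perm l := List.filter_append_perm _ l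
    have h2 : ((l.filter (fun x => !decide (p < x))).filter (fun x : Int => x == p)
        ++ (l.filter (fun x => !decide (p < x))).filter (fun x : Int => !(x == p))).Perm
        (l.filter (fun x => !decide (p < x))) := List.filter_append_perm _ _
    have e1 : (l.filter (fun x => !decide (p < x))).filter (fun x : Int => x == p)
        = l.filter (fun x : Int => x == p) := by
      rw [List.filter_filter]
      refine List.filter_congr (fun x _ => ?_)
      by_cases hx : x = p <;> simp [hx]
    have e2 : (l.filter (fun x => !decide (p < x))).filter (fun x : Int => !(x == p))
        = l.filter (fun x : Int => decide (x < p)) := by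
      rw [List.filter_filter]
      refine List.filter_congr (fun x _ => ?_)
      by_cases h1 : x < p <;> by_cases h2 : x = p <;> simp [h1, h2] <;> omega
    have hA : (pvSortD (l.filter (fun x => decide (p < x)))
        ++ (l.filter (fun x => x == p) ++ pvSortD (l.filter (fun x => decide (x < p))))).Perm
        (l.filter (fun x => decide (p < x))
        ++ (l.filter (fun x => x == p) ++ l.filter (fun x => decide (x < p)))) :=
      List.Perm.append (pv_sortD_perm _) (List.Perm.append (List.Perm.refl _) (pv_sortD_perm _))
    have h3 : (l.filter (fun x => decide (p < x))
        ++ (l.filter (fun x => x == p) ++ l.filter (fun x => decide (x < p)))).Perm l := by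
      rw [← e1, ← e2]
      exact (List.Perm.append_left _ h2).trans h1
    exact hA.trans h3
  have hpair : (pvSortD (l.filter (fun x => decide (p < x)))
      ++ (l.filter (fun x => x == p) ++ pvSortD (l.filter (fun x => decide (x < p))))).Pairwise
      (fun a b : Int => b ≤ a) := by
    rw [List.pairwise_append]
    refine ⟨pv_sortD_pairwise _, ?_, ?_⟩
    · rw [List.pairwise_append]
      refine ⟨pv_pairwise_of_all_eq p _ heq, pv_sortD_pairwise _, fun a ha b hb => ?_⟩
      have hbm : b ∈ l.filter (fun x => decide (x < p)) := ((pv_sortD_perm _).mem_iff).mp hb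
      have := hlo b hbm; have := heq a ha; omega
    · intro a ha b hb
      have ham : a ∈ l.filter (fun x => decide (p < x)) := ((pv_sortD_perm _).mem_iff).mp ha
      have hap := hhi a ham
      rcases List.mem_append.mp hb with hb1 | hb2
      · have := heq b hb1; omega
      · have hbm : b ∈ l.filter (fun x => decide (x < p)) := ((pv_sortD_perm _).mem_iff).mp hb2
        have := hlo b hbm; omega
  exact List.Perm.eq_of_pairwise (le := fun a b : Int => b ≤ a)
    (fun a b _ _ h1 h2 => le_antisymm h2 h1) (pv_sortD_pairwise l) hpair
    (hperm.trans (pv_sortD_perm l).symm).symm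

-- the quickselect recursion computes the sum of the k largest entries, i.e. of (sortD l).take k
theorem pv_topSum_eq : ∀ (N : Nat) (l : List Int), l.length ≤ N → ∀ (k : Int),
    pvTopSumFuel N l k = ((pvSortD l).take k.toNat).sum := by
  intro N
  induction N with
  | zero =>
    intro l hl k
    have : l = [] := List.length_eq_zero_iff.mp (Nat.le_zero.mp hl)
    subst this
    simp [pvTopSumFuel, pvSortD, PySem.List.sorted]
  | succ N ih =>
    intro l hl k
    by_cases hk0 : k ≤ 0
    · rw [pvTopSumFuel, if_pos hk0]
      have : k.toNat = 0 := by omega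
      simp [this]
    · by_cases hkl : (l.length : Int) ≤ k
      · rw [pvTopSumFuel, if_neg hk0, if_pos hkl]
        have hlen : (pvSortD l).length ≤ k.toNat := by
          rw [(pv_sortD_perm l).length_eq]; omega
        rw [List.take_of_length_le hlen, (pv_sortD_perm l).sum_eq]
      · -- recursive case: 0 < k < len l
        rw [pvTopSumFuel, if_neg hk0, if_neg hkl]
        dsimp only
        have hlpos : 0 < l.length := by omega
        set p := PySem.List.pyGetD l ((l.length : Int) / 2) 0 with hp
        set hi := l.filter (fun x => decide (p < x)) with hhi
        set eq := l.filter (fun x : Int => x == p) with heq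
        set lo := l.filter (fun x => decide (x < p)) with hlo
        have hpm : p ∈ l := pv_pivot_mem l hlpos
        have hhilt : hi.length < l.length := pv_filter_length_lt hpm (by simp)
        have hlolt : lo.length < l.length := pv_filter_length_lt hpm (by simp)
        have hpart := pv_sortD_partition l p
        rw [← hhi, ← heq, ← hlo] at hpart
        have hsl : (pvSortD hi).length = hi.length := (pv_sortD_perm hi).length_eq
        split_ifs with hb1 hb2
        · -- k ≤ |hi|
          rw [ih hi (by omega) k, hpart, List.take_append,
              show k.toNat - (pvSortD hi).length = 0 by omega]
          simp
        · -- |hi| < k ≤ |hi| + |eq|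
          rw [hpart, List.take_append,
              List.take_of_length_le (by omega), List.take_append,
              show k.toNat - (pvSortD hi).length - eq.length = 0 by omega,
              List.take_zero]
          rw [List.sum_append, List.sum_append, List.sum_nil, add_zero,
              (pv_sortD_perm hi).sum_eq]
          have htk : ((eq.take (k.toNat - (pvSortD hi).length)).sum)
              = p * (k - (hi.length : Int)) := by
            have hall : ∀ x ∈ eq.take (k.toNat - (pvSortD hi).length), x = p := by
              intro x hx
              have hxeq : x ∈ eq := List.mem_of_mem_take hx
              rw [heq] at hxeq
              simpa using (List.mem_filter.mp hxeq).2
            rw [pv_sum_all_eq p _ hall, List.length_take,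
                show min (k.toNat - (pvSortD hi).length) eq.length
                  = k.toNat - (pvSortD hi).length by omega]
            congr 1
            omega
          rw [htk]
        · -- |hi| + |eq| < k < len l
          rw [hpart, List.take_append,
              List.take_of_length_le (by omega), List.take_append,
              List.take_of_length_le (by omega)]
          rw [List.sum_append, List.sum_append, (pv_sortD_perm hi).sum_eq]
          rw [ih lo (by omega) (k - (hi.length : Int) - (eq.length : Int)),
              show (k - (hi.length : Int) - (eq.length : Int)).toNat
                = k.toNat - (pvSortD hi).length - eq.length by omega]
          ring

-- ===== VERDICT (by name: the statement is the Claim_ definition above) =====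
theorem getMaximumRewardPoints_spec : Claim_unchanged_getMaximumRewardPoints := by
  intro n k arr1 arr2 _ hpre hnd
  rcases hpre with ⟨hk0, hkn, h1, h2⟩ | ⟨hn, hnk, hk⟩ | ⟨hn, hnk, hk, _, _⟩
  case inr.inl =>
    have e1 : PySem.List.pyRange 0 n 1 = [] := PySem.List.pyRange_one_eq_nil (by omega)
    have e2 : PySem.List.pyRange 0 k 1 = [] := PySem.List.pyRange_one_eq_nil (by omega)
    have e3 : PySem.List.pyRange k n 1 = [] := PySem.List.pyRange_one_eq_nil (by omega)
    unfold getMaximumRewardPoints getMaximumRewardPoints_alt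
    rw [e1, e2, e3]
    simp [pv_topSum_nil, PySem.List.sorted]
  case inr.inr =>
    exact absurd ⟨hk, by omega⟩ hnd
  unfold getMaximumRewardPoints getMaximumRewardPoints_alt
  set key : Int → Int := fun i => PySem.List.pyGetD arr1 i 0 - PySem.List.pyGetD arr2 i 0 with hkey
  set σ := PySem.List.sorted (PySem.List.pyRange 0 n 1) key true with hσ
  set dlist := (PySem.List.pyRange 0 n 1).map key with hdlist
  set diffs := pvSortD dlist with hdiffs
  have hn0 : (0:Int) ≤ n := le_trans hk0 hkn
  have hσperm : σ.Perm (PySem.List.pyRange 0 n 1) := PySem.List.sorted_perm _ _ _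
  have hσlen : (σ.length : Int) = n := by
    rw [hσperm.length_eq, PySem.List.length_pyRange_one]; omega
  set K := k.toNat with hK
  have hkK : k = (K : Int) := by omega
  have hKlen : K ≤ σ.length := by omega
  -- σ mapped through the key is the sorted diff list
  have hmapkey : σ.map key = diffs := by
    have hperm : (σ.map key).Perm dlist := hσperm.map key
    have hperm2 : (σ.map key).Perm diffs :=
      hperm.trans (pv_sortD_perm dlist).symm
    have hs1 : (σ.map key).Pairwise (fun a b => b ≤ a) := by
      have := PySem.List.sorted_pairwise_rev (PySem.List.pyRange 0 n 1) key
      rw [← hσ] at this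
      exact (List.pairwise_map).mpr this
    have hs2 : diffs.Pairwise (fun a b => b ≤ a) := pv_sortD_pairwise dlist
    exact List.Perm.eq_of_pairwise (le := fun a b : Int => b ≤ a)
      (fun a b _ _ h1 h2 => le_antisymm h2 h1) hs1 hs2 hperm2
  -- the two loops of A and B's base loop as sums; B's selection via pv_topSum_eq
  rw [pv_foldl_add, pv_foldl_add, pv_foldl_add,
      show pvTopSum dlist k = pvTopSumFuel dlist.length dlist k from rfl,
      pv_topSum_eq dlist.length dlist (le_refl _) k, ← hdiffs, ← hK]
  have htake : (PySem.List.pyRange 0 k 1).map (fun i => PySem.List.pyGetD σ i 0) = σ.take K := by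
    rw [hkK]; exact pv_map_pyGetD_range_take σ K hKlen
  have hdrop : (PySem.List.pyRange k n 1).map (fun i => PySem.List.pyGetD σ i 0) = σ.drop K := by
    rw [← hσlen, hkK]
    have := PySem.List.map_pyGetD_pyRange' σ 0 (a := (K : Int)) (by positivity)
    simpa using this
  have hcomp1 : (PySem.List.pyRange 0 k 1).map
      (fun i => PySem.List.pyGetD arr1 (PySem.List.pyGetD σ i 0) 0)
      = (σ.take K).map (fun j => PySem.List.pyGetD arr1 j 0) := by
    rw [← htake, List.map_map]; rfl
  have hcomp2 : (PySem.List.pyRange k n 1).map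
      (fun i => PySem.List.pyGetD arr2 (PySem.List.pyGetD σ i 0) 0)
      = (σ.drop K).map (fun j => PySem.List.pyGetD arr2 j 0) := by
    rw [← hdrop, List.map_map]; rfl
  rw [hcomp1, hcomp2]
  -- split arr1 into arr2 + diff on the first part
  have hsplit : ((σ.take K).map (fun j => PySem.List.pyGetD arr1 j 0)).sum
      = ((σ.take K).map (fun j => PySem.List.pyGetD arr2 j 0)).sum
        + ((σ.take K).map key).sum := by
    rw [← pv_sum_map_split]
    refine congrArg List.sum (List.map_congr_left ?_)
    intro j _
    simp only [hkey]
    ring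
  rw [hsplit]
  -- recombine take/drop of the arr2 sums
  have hrecomb : ((σ.take K).map (fun j => PySem.List.pyGetD arr2 j 0)).sum
      + ((σ.drop K).map (fun j => PySem.List.pyGetD arr2 j 0)).sum
      = (σ.map (fun j => PySem.List.pyGetD arr2 j 0)).sum := by
    rw [← List.sum_append, ← List.map_append, List.take_append_drop]
  -- σ's arr2 sum equals the range's arr2 sum (permutation)
  have harr2 : (σ.map (fun j => PySem.List.pyGetD arr2 j 0)).sum
      = ((PySem.List.pyRange 0 n 1).map (fun j => PySem.List.pyGetD arr2 j 0)).sum :=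
    (hσperm.map _).sum_eq
  rw [← hmapkey, ← List.map_take]
  linarith [hrecomb, harr2]

theorem getMaximumRewardPoints_changed : Claim_changed_getMaximumRewardPoints := by
  unfold Claim_changed_getMaximumRewardPoints; decide
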